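-- pv_equiv track=rewrite | github.com/EmaSevcikova/shellcode_detector | signature_detector/pattern_utils.py | find_pattern_sets
-- ===== SOURCE A (Python) =====
-- def find_pattern(buffer, pattern, max_iter=0):
--     """Find the first occurrence of a pattern in a buffer."""
--     pattern_length = len(pattern)
--     buffer_length = len(buffer)
--     max_index = min(buffer_length - pattern_length + 1, max_iter if max_iter > 0 else buffer_length)
--
--     for i in range(max_index):
--         if all(
--                 pattern[j] is None or
--                 (isinstance(pattern[j], int) and pattern[j] > 0xF0) or
--                 buffer[i + j] == pattern[j]
--                 for j in range(pattern_length)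
--         ):
--             return i
--     return -1
--
-- def find_all_patterns(buffer, pattern, max_iter=0):
--     """Find all occurrences of a pattern in a buffer."""
--     pattern_length = len(pattern)
--     buffer_length = len(buffer)
--     max_index = min(buffer_length - pattern_length + 1, max_iter if max_iter > 0 else buffer_length)
--
--     return [
--         i for i in range(max_index)
--         if all(
--             pattern[j] is None or
--             (isinstance(pattern[j], int) and pattern[j] > 0xF0) or
--             buffer[i + j] == pattern[j]
--             for j in range(pattern_length)
--         )
--     ]
--
-- def find_pattern_sets(buffer, pattern_sets, max_distance=100):
--     """
--     Find occurrences of multiple pattern sets with distance constraints.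
--     Returns True if all pattern sets are found within max_distance of each other.
--     """
--     if not pattern_sets:
--         return False
--
--     # Find locations of first pattern set
--     first_pattern_locs = []
--     for pattern in pattern_sets[0]:
--         first_pattern_locs.extend(find_all_patterns(buffer, pattern))
--
--     if not first_pattern_locs:
--         return False
--
--     # For each starting point, check if all other patterns exist within max_distance
--     for start_loc in first_pattern_locs:
--         search_start = max(0, start_loc - max_distance)
--         search_end = min(len(buffer), start_loc + max_distance)
--         search_buffer = buffer[search_start:search_end]
--
--         # Check if all remaining pattern sets can be found in the search buffer
--         if all(
--                 any(
--                     find_pattern(search_buffer, pattern) != -1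
--                     for pattern in pattern_set
--                 )
--                 for pattern_set in pattern_sets[1:]
--         ):
--             return True
--
--     return False
-- ===== SOURCE B (Python) =====
-- def find_pattern_sets(buffer, pattern_sets, max_distance=100):
--     """
--     Index-based search: compute every pattern's match positions over the buffer
--     once, then decide each candidate start by comparing positions against the
--     window bounds -- no per-start slicing or re-matching.
--     """
--     if not pattern_sets:
--         return False
--     n = len(buffer)
--
--     def matches_at(pat, i):
--         return all(p is None or (isinstance(p, int) and p > 0xF0) or buffer[i + j] == p
--                    for j, p in enumerate(pat))
--
--     def occurrences(pat):
--         L = len(pat)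
--         return [i for i in range(n) if i + L <= n and matches_at(pat, i)]
--
--     starts = [i for pat in pattern_sets[0] for i in occurrences(pat)]
--     if not starts:
--         return False
--
--     indexed = [[(occurrences(pat), len(pat)) for pat in pattern_set]
--                for pattern_set in pattern_sets[1:]]
--
--     for s in starts:
--         lo, hi, _ = slice(max(0, s - max_distance), min(n, s + max_distance)).indices(n)
--         if all(any(any(lo <= p < hi and p + L <= hi for p in positions)
--                    for positions, L in pats)
--                for pats in indexed):
--             return True
--     return False
-- ===== Notes on version B (the rewrite author's own statement) =====
-- stated objective: alternative
-- what changed: B computes every pattern's match positions over the buffer once and decides each candidate start by comparing those positions with the resolved window bounds, instead of A's per-start buffer slicing and full re-matching of every pattern inside each window.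
import Mathlib
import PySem

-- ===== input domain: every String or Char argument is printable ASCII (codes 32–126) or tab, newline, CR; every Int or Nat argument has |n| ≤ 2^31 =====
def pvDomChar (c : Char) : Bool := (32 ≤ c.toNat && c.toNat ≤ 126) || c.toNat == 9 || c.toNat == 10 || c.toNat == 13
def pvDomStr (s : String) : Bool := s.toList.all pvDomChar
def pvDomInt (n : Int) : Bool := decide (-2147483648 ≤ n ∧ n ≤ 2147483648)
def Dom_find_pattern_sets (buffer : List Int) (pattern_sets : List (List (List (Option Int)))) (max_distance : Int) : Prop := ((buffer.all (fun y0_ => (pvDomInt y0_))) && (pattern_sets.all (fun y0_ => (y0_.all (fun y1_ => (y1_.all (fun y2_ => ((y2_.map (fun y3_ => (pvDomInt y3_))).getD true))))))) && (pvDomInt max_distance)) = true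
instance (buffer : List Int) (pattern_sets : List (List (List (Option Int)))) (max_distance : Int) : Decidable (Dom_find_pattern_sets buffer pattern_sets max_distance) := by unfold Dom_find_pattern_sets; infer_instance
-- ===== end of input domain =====

-- B computes every pattern's match positions over the buffer once and tests each candidate start
-- against those positions, instead of re-slicing and re-matching per start (objective: alternative).


-- ===== PORT A =====
-- the 'all(...)' generator over range(pattern_length) inside find_pattern / find_all_patterns
def pvAllMatch (buffer : List Int) (pattern : List (Option Int)) (i : Int) : Bool :=
  (PySem.List.pyRange 0 (pattern.length : Int) 1).all (fun j =>
    match PySem.List.pyGetD pattern j none with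
    | none => true                                   -- pattern[j] is None
    | some v => decide (v > 240) || (PySem.List.pyGet? buffer (i + j) == some v))

-- find_pattern(buffer, pattern, max_iter=0): first matching index or -1
def pyFindPattern (buffer : List Int) (pattern : List (Option Int)) (max_iter : Int) : Int :=
  let pattern_length : Int := pattern.length
  let buffer_length : Int := buffer.length
  let max_index := min (buffer_length - pattern_length + 1)
      (if max_iter > 0 then max_iter else buffer_length)
  match (PySem.List.pyRange 0 max_index 1).find? (fun i => pvAllMatch buffer pattern i) with
  | some i => i
  | none => -1

-- find_all_patterns(buffer, pattern, max_iter=0)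
def pyFindAllPatterns (buffer : List Int) (pattern : List (Option Int)) (max_iter : Int) : List Int :=
  let pattern_length : Int := pattern.length
  let buffer_length : Int := buffer.length
  let max_index := min (buffer_length - pattern_length + 1)
      (if max_iter > 0 then max_iter else buffer_length)
  (PySem.List.pyRange 0 max_index 1).filter (fun i => pvAllMatch buffer pattern i)

def find_pattern_sets (buffer : List Int) (pattern_sets : List (List (List (Option Int)))) (max_distance : Int) : Bool :=
  match pattern_sets with
  | [] => false
  | first :: rest =>
    let first_pattern_locs :=
      first.foldl (fun acc pattern => acc ++ pyFindAllPatterns buffer pattern 0) []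
    if first_pattern_locs.isEmpty then false
    else
      first_pattern_locs.any (fun start_loc =>
        let search_start := max 0 (start_loc - max_distance)
        let search_end := min (buffer.length : Int) (start_loc + max_distance)
        let search_buffer := PySem.List.slice buffer (some search_start) (some search_end)
        rest.all (fun pattern_set =>
          pattern_set.any (fun pattern => pyFindPattern search_buffer pattern 0 != -1)))

-- ===== PORT B =====
-- matches_at(pat, i): iterates enumerate(pat)
def pvMatchesAt (buffer : List Int) (pattern : List (Option Int)) (i : Int) : Bool :=
  (PySem.List.enumerate pattern 0).all (fun jp =>
    match jp.2 with
    | none => true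
    | some v => decide (v > 240) || (PySem.List.pyGet? buffer (i + jp.1) == some v))

-- occurrences(pat): [i for i in range(n) if i + L <= n and matches_at(pat, i)]
def pvOccurrences (buffer : List Int) (pattern : List (Option Int)) : List Int :=
  (PySem.List.pyRange 0 (buffer.length : Int) 1).filter
    (fun i => decide (i + (pattern.length : Int) ≤ (buffer.length : Int)) &&
      pvMatchesAt buffer pattern i)

def find_pattern_sets_alt (buffer : List Int) (pattern_sets : List (List (List (Option Int)))) (max_distance : Int) : Bool :=
  match pattern_sets with
  | [] => false
  | first :: rest =>
    let n : Int := buffer.length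
    let starts := first.flatMap (fun pat => pvOccurrences buffer pat)
    if starts.isEmpty then false
    else
      let indexed := rest.map (fun pattern_set =>
        pattern_set.map (fun pat => (pvOccurrences buffer pat, (pat.length : Int))))
      starts.any (fun s =>
        -- lo, hi, _ = slice(max(0, s - max_distance), min(n, s + max_distance)).indices(n):
        -- exact, hand-ported resolution of slice.indices for a nonnegative start and stop ≤ n
        let a := max 0 (s - max_distance)
        let b := min n (s + max_distance)
        let lo := min a n
        let hi := if b < 0 then (if n + b < 0 then 0 else n + b) else min b n
        indexed.all (fun pats =>
          pats.any (fun pl =>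
            pl.1.any (fun p =>
              decide (lo ≤ p) && decide (p < hi) && decide (p + pl.2 ≤ hi)))))

-- ===== PRECONDITION & SPEC =====
def Spec_find_pattern_sets (buffer : List Int) (pattern_sets : List (List (List (Option Int)))) (max_distance : Int) (out : Bool) : Prop := out = find_pattern_sets_alt buffer pattern_sets max_distance
instance (buffer : List Int) (pattern_sets : List (List (List (Option Int)))) (max_distance : Int) (out : Bool) : Decidable (Spec_find_pattern_sets buffer pattern_sets max_distance out) := by unfold Spec_find_pattern_sets; infer_instance

-- ===== CLAIM (what is proved, stated in full; the proofs are below) =====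
def Claim_equal_find_pattern_sets : Prop := ∀ (buffer : List Int) (pattern_sets : List (List (List (Option Int)))) (max_distance : Int), Dom_find_pattern_sets buffer pattern_sets max_distance → Spec_find_pattern_sets buffer pattern_sets max_distance (find_pattern_sets buffer pattern_sets max_distance)

-- ===== LEMMAS AND PROOFS =====

-- B's matcher over enumerate(pattern) equals A's matcher over range(len(pattern)).
lemma pvMatchesAt_eq (buffer : List Int) (pattern : List (Option Int)) (i : Int) :
    pvMatchesAt buffer pattern i = pvAllMatch buffer pattern i := by
  unfold pvMatchesAt pvAllMatch
  rw [PySem.List.enumerate_eq_map_pyRange pattern none, List.all_map]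
  rfl

-- B's occurrence list is A's find_all_patterns with max_iter = 0.
lemma pvOccurrences_eq (buffer : List Int) (pattern : List (Option Int)) :
    pvOccurrences buffer pattern = pyFindAllPatterns buffer pattern 0 := by
  unfold pvOccurrences pyFindAllPatterns
  simp only [gt_iff_lt, lt_self_iff_false, if_false]
  set n : Int := (buffer.length : Int) with hn
  set L : Int := (pattern.length : Int) with hLdef
  have hn0 : 0 ≤ n := by rw [hn]; positivity
  have hL0 : 0 ≤ L := by rw [hLdef]; positivity
  by_cases hm : 0 ≤ min (n - L + 1) n
  · rw [PySem.List.pyRange_one_append 0 (min (n - L + 1) n) n hm (min_le_right _ _),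
      List.filter_append]
    have h2 : (PySem.List.pyRange (min (n - L + 1) n) n 1).filter
        (fun i => decide (i + L ≤ n) && pvMatchesAt buffer pattern i) = [] := by
      rw [List.filter_eq_nil_iff]
      intro i hi
      rw [PySem.List.mem_pyRange_one] at hi
      have : ¬ (i + L ≤ n) := by omega
      simp [this]
    rw [h2, List.append_nil]
    apply List.filter_congr
    intro i hi
    rw [PySem.List.mem_pyRange_one] at hi
    have : i + L ≤ n := by omega
    simp [this, pvMatchesAt_eq]
  · rw [PySem.List.pyRange_one_eq_nil (by omega : min (n - L + 1) n ≤ 0)]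
    simp only [List.filter_nil]
    rw [List.filter_eq_nil_iff]
    intro i hi
    rw [PySem.List.mem_pyRange_one] at hi
    have : ¬ (i + L ≤ n) := by omega
    simp [this]

-- characterising membership in the occurrence list
lemma mem_pvOccurrences {buffer : List Int} {pattern : List (Option Int)} {p : Int}
    (hp : p ∈ pvOccurrences buffer pattern) :
    0 ≤ p ∧ p < (buffer.length : Int) ∧ p + (pattern.length : Int) ≤ (buffer.length : Int) ∧
      pvAllMatch buffer pattern p = true := by
  unfold pvOccurrences at hp
  rw [List.mem_filter, PySem.List.mem_pyRange_one] at hp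
  obtain ⟨⟨h0, h1⟩, h2⟩ := hp
  rw [Bool.and_eq_true, decide_eq_true_eq] at h2
  exact ⟨h0, h1, h2.1, by rw [← pvMatchesAt_eq]; exact h2.2⟩

-- 'first index or -1' ≠ -1 is exactly 'any', for a list of nonnegative candidates
lemma findD_ne_neg_one (l : List Int) (q : Int → Bool) (h : ∀ x ∈ l, 0 ≤ x) :
    ((match l.find? q with | some i => i | none => (-1 : Int)) != -1) = l.any q := by
  induction l with
  | nil => simp
  | cons a t ih =>
    by_cases hqa : q a = true
    · have ha : a ≠ -1 := by have := h a (List.mem_cons_self); omega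
      simp [hqa, ha]
    · simp [hqa, ih (fun x hx => h x (List.mem_cons_of_mem a hx))]

-- index transfer from the window slice to the full buffer
lemma pvAllMatch_transfer (buffer : List Int) (pattern : List (Option Int)) (A B : Nat)
    (i : Int) (h0 : 0 ≤ i)
    (hiL : i + (pattern.length : Int) ≤ ((B - A : Nat) : Int)) :
    pvAllMatch (List.take (B - A) (List.drop A buffer)) pattern i
      = pvAllMatch buffer pattern ((A : Int) + i) := by
  unfold pvAllMatch
  rw [Bool.eq_iff_iff, List.all_eq_true, List.all_eq_true]
  have hbody : ∀ j ∈ PySem.List.pyRange 0 (pattern.length : Int) 1,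
      (match PySem.List.pyGetD pattern j none with
        | none => true
        | some v => decide (v > 240) ||
            (PySem.List.pyGet? (List.take (B - A) (List.drop A buffer)) (i + j) == some v))
      = (match PySem.List.pyGetD pattern j none with
        | none => true
        | some v => decide (v > 240) ||
            (PySem.List.pyGet? buffer ((A : Int) + i + j) == some v)) := by
    intro j hj
    rw [PySem.List.mem_pyRange_one] at hj
    have hget : PySem.List.pyGet? (List.take (B - A) (List.drop A buffer)) (i + j)
        = PySem.List.pyGet? buffer ((A : Int) + i + j) := by
      rw [PySem.List.pyGet?_of_nonneg _ (by omega), PySem.List.pyGet?_of_nonneg _ (by omega)]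
      have ht : (i + j).toNat < B - A := by omega
      rw [List.getElem?_take, if_pos ht, List.getElem?_drop]
      congr 1
      omega
    rcases hEq : PySem.List.pyGetD pattern j none with _ | v <;> simp [hget]
  constructor
  · intro h j hj; rw [← hbody j hj]; exact h j hj
  · intro h j hj; rw [hbody j hj]; exact h j hj

-- the central window lemma: a pattern matches inside the slice buffer[A:B] (already resolved to
-- Nat bounds A, B) iff some full-buffer occurrence p satisfies A ≤ p < B and p + len ≤ B
lemma window_eq (buffer : List Int) (pattern : List (Option Int)) (A B : Nat)
    (hB : B ≤ buffer.length) :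
    (pyFindPattern (List.take (B - A) (List.drop A buffer)) pattern 0 != -1)
      = (pvOccurrences buffer pattern).any
          (fun p => decide ((A : Int) ≤ p) && decide (p < (B : Int)) &&
            decide (p + (pattern.length : Int) ≤ (B : Int))) := by
  have hm : (List.take (B - A) (List.drop A buffer)).length = B - A := by
    simp [List.length_take, List.length_drop]; omega
  unfold pyFindPattern
  simp only [hm]
  rw [findD_ne_neg_one _ _ (fun x hx => by
    rw [PySem.List.mem_pyRange_one] at hx; exact hx.1)]
  rw [Bool.eq_iff_iff, List.any_eq_true, List.any_eq_true]
  constructor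
  · rintro ⟨i, hi, hmatch⟩
    rw [PySem.List.mem_pyRange_one] at hi
    have h1 : 0 ≤ i := hi.1
    have h2 : i < min (((B - A : Nat) : Int) - pattern.length + 1)
        (if (0:Int) > 0 then 0 else ((B - A : Nat) : Int)) := hi.2
    rw [if_neg (by omega), lt_min_iff] at h2
    have hAB : A < B := by omega
    have hiL : i + (pattern.length : Int) ≤ ((B - A : Nat) : Int) := by omega
    rw [pvAllMatch_transfer buffer pattern A B i h1 hiL] at hmatch
    refine ⟨(A : Int) + i, ?_, ?_⟩
    · unfold pvOccurrences
      rw [List.mem_filter, PySem.List.mem_pyRange_one]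
      refine ⟨⟨by omega, by omega⟩, ?_⟩
      rw [Bool.and_eq_true, decide_eq_true_eq]
      exact ⟨by omega, by rw [pvMatchesAt_eq]; exact hmatch⟩
    · simp only [Bool.and_eq_true, decide_eq_true_eq]
      exact ⟨⟨by omega, by omega⟩, by omega⟩
  · rintro ⟨p, hp, hcond⟩
    simp only [Bool.and_eq_true, decide_eq_true_eq] at hcond
    obtain ⟨⟨hAp, hpB⟩, hBp⟩ := hcond
    obtain ⟨hp0, hpn, hfit, hmatch⟩ := mem_pvOccurrences hp
    have hAB : A < B := by omega
    refine ⟨p - A, ?_, ?_⟩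
    · rw [PySem.List.mem_pyRange_one, if_neg (by omega), lt_min_iff]
      refine ⟨by omega, by omega, by omega⟩
    · have hiL : (p - (A:Int)) + (pattern.length : Int) ≤ ((B - A : Nat) : Int) := by omega
      rw [pvAllMatch_transfer buffer pattern A B (p - A) (by omega) hiL]
      have : (A : Int) + (p - A) = p := by omega
      rwa [this]

-- B's hand-resolved window bounds are exactly the clamped slice bounds A's slicing uses
lemma lo_eq (n : Nat) (a : Int) (ha : 0 ≤ a) :
    ((PySem.List.clampIdx n a : Nat) : Int) = min a n := by
  simp only [PySem.List.clampIdx]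
  split_ifs <;> push_cast <;> omega

lemma hi_eq (n : Nat) (b : Int) (hb : b ≤ (n : Int)) :
    ((PySem.List.clampIdx n b : Nat) : Int)
      = (if b < 0 then (if (n : Int) + b < 0 then 0 else (n : Int) + b) else min b (n : Int)) := by
  simp only [PySem.List.clampIdx]
  split_ifs <;> push_cast <;> omega

-- the slice A builds is exactly take/drop at the clamped bounds (definition of PySem slice)
lemma slice_eq_take_drop (xs : List Int) (a b : Int) :
    PySem.List.slice xs (some a) (some b)
      = List.take (PySem.List.clampIdx xs.length b - PySem.List.clampIdx xs.length a)
          (List.drop (PySem.List.clampIdx xs.length a) xs) := by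
  rfl

-- per-start equivalence of A's window tests and B's position tests
lemma per_start_eq (buffer : List Int) (rest : List (List (List (Option Int)))) (d s : Int) :
    (rest.all (fun pattern_set =>
        pattern_set.any (fun pattern =>
          pyFindPattern (PySem.List.slice buffer (some (max 0 (s - d)))
            (some (min (buffer.length : Int) (s + d)))) pattern 0 != -1)))
    = ((rest.map (fun pattern_set =>
          pattern_set.map (fun pat => (pvOccurrences buffer pat, (pat.length : Int))))).all
        (fun pats => pats.any (fun pl =>
          pl.1.any (fun p =>
            decide ((min (max 0 (s - d)) (buffer.length : Int)) ≤ p) &&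
            decide (p <
              (if (min (buffer.length : Int) (s + d)) < 0
               then (if (buffer.length : Int) + (min (buffer.length : Int) (s + d)) < 0 then 0
                     else (buffer.length : Int) + (min (buffer.length : Int) (s + d)))
               else min (min (buffer.length : Int) (s + d)) (buffer.length : Int))) &&
            decide (p + pl.2 ≤
              (if (min (buffer.length : Int) (s + d)) < 0
               then (if (buffer.length : Int) + (min (buffer.length : Int) (s + d)) < 0 then 0
                     else (buffer.length : Int) + (min (buffer.length : Int) (s + d)))
               else min (min (buffer.length : Int) (s + d)) (buffer.length : Int))))))) := by
  rw [List.all_map]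
  simp only [Function.comp_def]
  apply List.all_congr rfl
  intro pattern_set
  rw [List.any_map]
  simp only [Function.comp_def]
  apply List.any_congr rfl
  intro pattern
  rw [slice_eq_take_drop,
    window_eq buffer pattern _ _ (PySem.List.clampIdx_le _ _)]
  apply List.any_congr rfl
  intro p
  rw [lo_eq buffer.length (max 0 (s - d)) (by omega),
    hi_eq buffer.length (min (buffer.length : Int) (s + d)) (by omega)]

-- ===== VERDICT (by name: the statement is the Claim_ definition above) =====
theorem find_pattern_sets_spec : Claim_equal_find_pattern_sets := by
  unfold Claim_equal_find_pattern_sets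
  intro buffer pattern_sets max_distance _hdom
  unfold Spec_find_pattern_sets
  cases pattern_sets with
  | nil => rfl
  | cons first rest =>
    simp only [find_pattern_sets, find_pattern_sets_alt]
    have hstarts : first.foldl (fun acc pattern => acc ++ pyFindAllPatterns buffer pattern 0) []
        = first.flatMap (fun pat => pvOccurrences buffer pat) := by
      rw [PySem.List.foldl_append_eq_flatMap]
      simp only [List.nil_append]
      apply List.flatMap_congr
      intro pat _
      exact (pvOccurrences_eq buffer pat).symm
    rw [hstarts]
    by_cases hempty : (first.flatMap (fun pat => pvOccurrences buffer pat)).isEmpty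
    · simp [hempty]
    · simp only [hempty, if_false, Bool.false_eq_true]
      apply List.any_congr rfl
      intro s
      exact per_start_eq buffer rest max_distance s
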